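-- pv_equiv track=rewrite | github.com/tarinduj/RPAL-Interpreter | ASTBuilder.py | getTreeLevel
-- ===== SOURCE A (Python) =====
-- def getTreeLevel(token):
--     count = 0
--     for char in token:
--         if char == ".":
--             count += 1
--         else:
--             break
--     return count
-- ===== SOURCE B (Python) =====
-- def getTreeLevel(token):
--     return len(token) - len(token.lstrip('.'))
-- ===== Notes on version B (the rewrite author's own statement) =====
-- stated objective: idiomatic
-- what changed: Replaced the explicit count-and-break loop with a length difference against str.lstrip with a dot argument, delegating the prefix scan to the string method.
import Mathlib
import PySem

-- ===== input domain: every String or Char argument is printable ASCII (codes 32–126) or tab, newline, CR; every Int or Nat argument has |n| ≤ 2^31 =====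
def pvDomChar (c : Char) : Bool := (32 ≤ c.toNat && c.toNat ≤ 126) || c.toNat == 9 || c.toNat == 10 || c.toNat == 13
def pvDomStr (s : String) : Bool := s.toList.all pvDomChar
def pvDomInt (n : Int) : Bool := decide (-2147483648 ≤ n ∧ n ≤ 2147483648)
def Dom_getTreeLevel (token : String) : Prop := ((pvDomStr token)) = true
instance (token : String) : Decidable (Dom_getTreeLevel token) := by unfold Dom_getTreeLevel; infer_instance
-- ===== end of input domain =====

-- B replaces A's counting loop with len(token) - len(token.lstrip('.')); return value only.
-- ===== PORT A =====
def getTreeLevelLoop : List Char → Int → Int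
  | [], count => count
  | ch :: rest, count => if ch = '.' then getTreeLevelLoop rest (count + 1) else count

def getTreeLevel (token : String) : Int :=
  getTreeLevelLoop token.toList 0

-- ===== PORT B =====
-- token.lstrip('.') ported by hand as dropWhile (· == '.'), exact: lstrip with a chars
-- argument drops exactly the longest prefix of characters from that set.
def getTreeLevel_alt (token : String) : Int :=
  (PySem.Str.len token : Int) - ((token.toList.dropWhile (fun ch => ch == '.')).length : Int)

-- ===== PRECONDITION & SPEC =====
def Spec_getTreeLevel (token : String) (out : Int) : Prop := out = getTreeLevel_alt token
instance (token : String) (out : Int) : Decidable (Spec_getTreeLevel token out) := by unfold Spec_getTreeLevel; infer_instance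

-- ===== CLAIM (what is proved, stated in full; the proofs are below) =====
def Claim_equal_getTreeLevel : Prop := ∀ (token : String), Dom_getTreeLevel token → Spec_getTreeLevel token (getTreeLevel token)

-- ===== LEMMAS AND PROOFS =====

-- ===== VERDICT (by name: the statement is the Claim_ definition above) =====
lemma getTreeLevelLoop_eq (l : List Char) (c : Int) :
    getTreeLevelLoop l c = c + ((l.length : Int) - ((l.dropWhile (fun ch => ch == '.')).length : Int)) := by
  induction l generalizing c with
  | nil => simp [getTreeLevelLoop]
  | cons ch rest ih =>
    by_cases h : ch = '.'
    · simp [getTreeLevelLoop, h, List.dropWhile, ih]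
      push_cast
      ring
    · have hb : (ch == '.') = false := by simp [h]
      simp [getTreeLevelLoop, h, List.dropWhile, hb]

theorem getTreeLevel_spec : Claim_equal_getTreeLevel := by
  intro token _
  unfold Spec_getTreeLevel getTreeLevel getTreeLevel_alt
  rw [getTreeLevelLoop_eq]
  simp [PySem.Str.len]
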